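-- pv_equiv track=rewrite | github.com/EthanLukas/LeetcodeSolutions | Arrays/Strings/NoPairs.py | minimalOperations
-- ===== SOURCE A (Python) =====
-- def minimalOperations(words):
--
--     retArr = []
--
--     for word in words:
--
--         minChanges = 0
--
--         n = len(word)
--
--         i = 0
--
--         while i < n-1:
--
--             # Same Letter
--             if word[i] == word[i+1]:
--
--                 # Three in a row
--                 if i+2 < n:
--                     if word[i+2] == word[i]:
--                         minChanges+=1
--                         i+=2
--                     else:
--                         minChanges+=1
--                         i+=2
--
--                 else:
--                     minChanges+=1
--                     i+=1
--
--             else: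
--                 i+=1
--
--         retArr.append(minChanges)
--
--     return retArr
-- ===== SOURCE B (Python) =====
-- from itertools import groupby
--
-- def minimalOperations(words):
--     return [sum(len(list(g)) // 2 for _, g in groupby(w)) for w in words]
-- ===== Notes on version B (the rewrite author's own statement) =====
-- stated objective: idiomatic
-- what changed: Replaces the index-jumping while loop by an itertools.groupby partition into maximal runs of equal characters, adding the closed form k//2 per run of length k.
import Mathlib
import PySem

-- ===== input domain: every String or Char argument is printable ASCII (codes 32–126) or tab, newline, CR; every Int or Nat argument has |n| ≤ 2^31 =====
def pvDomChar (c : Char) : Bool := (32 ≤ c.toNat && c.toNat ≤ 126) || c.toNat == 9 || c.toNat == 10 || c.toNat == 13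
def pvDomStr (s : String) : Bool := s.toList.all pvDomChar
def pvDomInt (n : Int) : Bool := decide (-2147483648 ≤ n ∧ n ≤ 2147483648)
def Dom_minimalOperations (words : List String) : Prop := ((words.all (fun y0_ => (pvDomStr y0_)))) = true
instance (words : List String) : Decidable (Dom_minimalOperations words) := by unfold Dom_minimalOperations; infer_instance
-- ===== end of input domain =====

-- B replaces A's index-jumping while loop by a groupby-style partition into maximal
-- runs of equal characters, adding the closed form k/2 per run (idiomatic, same cost).


-- ===== PORT A =====
-- the while loop of A; i and the bounds are the same Nat indices Python uses
-- (i stays in range whenever an element is read, so getD never takes its default)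
def pvLoopA (cs : List Char) (i : Nat) (minChanges : Int) : Int :=
  if i < cs.length - 1 then
    if cs.getD i default == cs.getD (i+1) default then
      if i + 2 < cs.length then
        if cs.getD (i+2) default == cs.getD i default then
          pvLoopA cs (i+2) (minChanges+1)
        else
          pvLoopA cs (i+2) (minChanges+1)
      else pvLoopA cs (i+1) (minChanges+1)
    else pvLoopA cs (i+1) minChanges
  else minChanges
termination_by cs.length - i
decreasing_by all_goals omega

def minimalOperations (words : List String) : List Int :=
  words.foldl (fun retArr word => retArr ++ [pvLoopA word.toList 0 0]) []

-- ===== PORT B =====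
-- groupby: run lengths of maximal runs of equal characters
def pvRunsGo (c : Char) (k : Nat) : List Char → List Nat
  | [] => [k]
  | d :: ds => if d == c then pvRunsGo c (k+1) ds else k :: pvRunsGo d 1 ds

def pvRunLens : List Char → List Nat
  | [] => []
  | c :: cs => pvRunsGo c 1 cs

def minimalOperations_alt (words : List String) : List Int :=
  words.map (fun w => (((pvRunLens w.toList).map (· / 2)).sum : Nat))

-- ===== PRECONDITION & SPEC =====
def Spec_minimalOperations (words : List String) (out : List Int) : Prop := out = minimalOperations_alt words
instance (words : List String) (out : List Int) : Decidable (Spec_minimalOperations words out) := by unfold Spec_minimalOperations; infer_instance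

-- ===== CLAIM (what is proved, stated in full; the proofs are below) =====
def Claim_equal_minimalOperations : Prop := ∀ (words : List String), Dom_minimalOperations words → Spec_minimalOperations words (minimalOperations words)

-- ===== LEMMAS AND PROOFS =====

-- proof-side characterisation of A's loop: pairwise skip over the suffix
def pvG : List Char → Nat
  | [] => 0
  | [_] => 0
  | a :: b :: t => if a == b then 1 + pvG t else pvG (b :: t)

theorem pvG_short (cs : List Char) (h : cs.length ≤ 1) : pvG cs = 0 := by
  match cs, h with
  | [], _ => rfl
  | [_], _ => rfl

theorem pvG_drop2 (cs : List Char) (i : Nat) (h : i + 1 < cs.length) :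
    cs.drop i = cs[i] :: cs[i+1] :: cs.drop (i+2) := by
  rw [List.drop_eq_getElem_cons (by omega : i < cs.length),
      List.drop_eq_getElem_cons h]

theorem pvLoopA_eq (cs : List Char) (i : Nat) (c : Int) :
    pvLoopA cs i c = c + (pvG (cs.drop i) : Int) := by
  fun_induction pvLoopA cs i c with
  | case1 i c h heq h2 h3 ih =>
    rw [ih, pvG_drop2 cs i (by omega)]
    rw [List.getD_eq_getElem cs default (by omega : i < cs.length),
        List.getD_eq_getElem cs default (by omega : i + 1 < cs.length)] at heq
    simp [pvG, heq]
    omega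
  | case2 i c h heq h2 h3 ih =>
    rw [ih, pvG_drop2 cs i (by omega)]
    rw [List.getD_eq_getElem cs default (by omega : i < cs.length),
        List.getD_eq_getElem cs default (by omega : i + 1 < cs.length)] at heq
    simp [pvG, heq]
    omega
  | case3 i c h heq h2 ih =>
    rw [ih, pvG_drop2 cs i (by omega)]
    rw [List.getD_eq_getElem cs default (by omega : i < cs.length),
        List.getD_eq_getElem cs default (by omega : i + 1 < cs.length)] at heq
    have hd : cs.drop (i+2) = [] := by
      apply List.drop_eq_nil_of_le; omega
    have hd1 : pvG (cs.drop (i+1)) = 0 := by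
      apply pvG_short; simp; omega
    rw [hd1, hd]
    simp [pvG, heq]
  | case4 i c h heq ih =>
    rw [ih, pvG_drop2 cs i (by omega)]
    rw [List.getD_eq_getElem cs default (by omega : i < cs.length),
        List.getD_eq_getElem cs default (by omega : i + 1 < cs.length)] at heq
    rw [List.drop_eq_getElem_cons (by omega : i + 1 < cs.length)]
    simp [pvG, heq]
  | case5 i c h =>
    have : pvG (cs.drop i) = 0 := by
      apply pvG_short; simp; omega
    simp [this]

-- leading-run decomposition
def pvTakeRun (c : Char) : List Char → Nat
  | [] => 0
  | d :: ds => if d == c then 1 + pvTakeRun c ds else 0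

theorem pvTakeRun_decomp (c : Char) (cs : List Char) :
    cs = List.replicate (pvTakeRun c cs) c ++ cs.drop (pvTakeRun c cs) := by
  induction cs with
  | nil => rfl
  | cons d ds ih =>
    by_cases hd : d = c
    · subst hd
      simp only [pvTakeRun, BEq.rfl, if_pos]
      rw [Nat.add_comm, List.replicate_succ, List.drop_succ_cons, List.cons_append]
      exact congrArg (List.cons d) ih
    · simp [pvTakeRun, hd]

theorem pvTakeRun_head (c : Char) (cs : List Char) (d : Char)
    (h : (cs.drop (pvTakeRun c cs)).head? = some d) : d ≠ c := by
  induction cs with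
  | nil => simp at h
  | cons e es ih =>
    by_cases he : e = c
    · subst he
      simp only [pvTakeRun, BEq.rfl, if_pos, Nat.add_comm 1, List.drop_succ_cons] at h
      exact ih h
    · simp [pvTakeRun, he] at h
      exact h ▸ he

theorem pvG_rep (k : Nat) (c : Char) (rest : List Char)
    (h : ∀ d, rest.head? = some d → d ≠ c) :
    pvG (List.replicate k c ++ rest) = k / 2 + pvG rest := by
  induction k using Nat.strong_induction_on with
  | _ k ih =>
    match k with
    | 0 => simp
    | 1 =>
      cases rest with
      | nil => simp [pvG]
      | cons d t =>
        have hd : ¬ (c = d) := fun e => (h d rfl) e.symm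
        simp [pvG, List.replicate, hd]
    | (k+2) =>
      have hr : List.replicate (k+2) c ++ rest = c :: c :: (List.replicate k c ++ rest) := by
        simp [List.replicate_succ]
      rw [hr]
      show (if c == c then 1 + pvG (List.replicate k c ++ rest)
            else pvG (c :: (List.replicate k c ++ rest))) = _
      rw [if_pos BEq.rfl, ih k (by omega)]
      omega

theorem pvRunsGo_rep (c : Char) (k m : Nat) (rest : List Char)
    (h : ∀ d, rest.head? = some d → d ≠ c) :
    pvRunsGo c k (List.replicate m c ++ rest) = (k + m) :: pvRunLens rest := by
  induction m generalizing k with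
  | zero =>
    cases rest with
    | nil => simp [pvRunsGo, pvRunLens]
    | cons d t =>
      have hd : ¬ (d = c) := h d rfl
      simp [pvRunsGo, hd, pvRunLens]
  | succ m ih =>
    have hr : List.replicate (m+1) c ++ rest = c :: (List.replicate m c ++ rest) := by
      simp [List.replicate_succ]
    rw [hr]
    show (if c == c then pvRunsGo c (k+1) (List.replicate m c ++ rest)
          else _) = _
    rw [if_pos BEq.rfl, ih (k+1)]
    congr 1
    omega

theorem pvG_runs (cs : List Char) :
    pvG cs = ((pvRunLens cs).map (· / 2)).sum := by
  match cs with
  | [] => rfl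
  | c :: cs' =>
    have hdec := pvTakeRun_decomp c cs'
    have hh := pvTakeRun_head c cs'
    have h1 : pvG (c :: cs') = (pvTakeRun c cs' + 1) / 2 + pvG (cs'.drop (pvTakeRun c cs')) := by
      have hc : c :: cs' = List.replicate (pvTakeRun c cs' + 1) c ++ cs'.drop (pvTakeRun c cs') := by
        rw [List.replicate_succ]
        simpa using hdec
      rw [hc]
      exact pvG_rep _ c _ hh
    have h2 : pvRunLens (c :: cs') = (pvTakeRun c cs' + 1) :: pvRunLens (cs'.drop (pvTakeRun c cs')) := by
      show pvRunsGo c 1 cs' = _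
      conv_lhs => rw [hdec]
      rw [pvRunsGo_rep c 1 _ _ hh]
      congr 1
      omega
    have hrec := pvG_runs (cs'.drop (pvTakeRun c cs'))
    rw [h1, h2, hrec]
    simp
termination_by cs.length
decreasing_by
  simp only [List.length_cons, List.length_drop]
  omega

theorem pvFoldl_append {α β : Type} (f : α → β) (ws : List α) (acc : List β) :
    ws.foldl (fun r w => r ++ [f w]) acc = acc ++ ws.map f := by
  induction ws generalizing acc with
  | nil => simp
  | cons w ws ih => simp [List.foldl, ih]

-- ===== VERDICT (by name: the statement is the Claim_ definition above) =====
theorem minimalOperations_spec : Claim_equal_minimalOperations := by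
  intro words _
  unfold Spec_minimalOperations minimalOperations minimalOperations_alt
  rw [pvFoldl_append]
  simp only [List.nil_append]
  apply List.map_congr_left
  intro w _
  rw [pvLoopA_eq, pvG_runs]
  simp
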